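-- pv_equiv track=rewrite | github.com/gabriellegebran/Minesweeper | minesweeper.py | get_neighbour_positions
-- ===== SOURCE A (Python) =====
-- def is_valid_position(board, row, col):
--     """
--     (list, int, int) -> bool
--     Checks if (row) is in the range of the number of nested lists in board, and
--     if (col) is in the range of the number of the elements in the nested lists of
--     board.
--     >>> board = init_board(5, 5, 0)
--     >>> is_valid_position(board, 2, 2)
--     True
--     >>> board = init_board(3, 4, 3)
--     >>> is_valid_position(board, 3, 4)
--     False
--     >>> board = init_board(3, 3, 1)
--     >>> is_valid_position(board, 0, 2)
--     True
--     """
--     # Conditions for not out-of-range row indices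
--     if row >= 0 and row <= len(board) - 1:
--         for sub_list in board:
--             # Conditions for not out-of-range column indices
--             if col >= 0 and col <= len(sub_list) - 1:
--                 return True
--
--     # In case indices are out-of-range
--     else:
--         return False
--
-- def get_neighbour_positions(board, row, col):
--     """
--     (list, int, int) -> list
--     Gives back the positions (list of nested lists containing integers) of the
--     neighbouring elements of (row, col) in the list (board).
--
--     >>> board = init_board(3, 3, 0)
--     >>> get_neighbour_positions(board, 1, 1)
--     [[0, 0], [0, 1], [0, 2], [1, 0], [1, 2], [2, 0], [2, 1], [2, 2]]
--
--     >>> board = init_board(1, 2, 0)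
--     >>> get_neighbour_positions(board, 0, 0)
--     [[0, 1]]
--
--     >>> board = init_board(6, 4, 0)
--     >>> get_neighbour_positions(board, 3, 2)
--     [[2, 1], [2, 2], [2, 3], [3, 1], [3, 3], [4, 1], [4, 2], [4, 3]]
--     """
--     neighb_pos = []
--
--     # Let i be the row index
--     for i in range(len(board)):
--         # Adjacent rows condition
--         if i == row - 1 or i == row or i == row + 1:
--             sub_list = board[i]
--             # Let j be the column index
--             for j in range(len(sub_list)):
--                 # Adjacent columns condition and verifying that the coordinate
--                 # obtained (i,j) is valid and that its not (row,col) itself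
--                 if (j == col - 1 or j == col or j == col + 1) and (
--                     is_valid_position(board, i, j) == True) and (
--                         (i, j) != (row, col)):
--
--                     neighb_pos += [[i, j]]
--
--     return neighb_pos
-- ===== SOURCE B (Python) =====
-- def get_neighbour_positions(board, row, col):
--     neighb_pos = []
--     for di in (-1, 0, 1):
--         i = row + di
--         if 0 <= i < len(board):
--             for dj in (-1, 0, 1):
--                 j = col + dj
--                 if not (di == 0 and dj == 0) and 0 <= j < len(board[i]):
--                     neighb_pos.append([i, j])
--     return neighb_pos
-- ===== Notes on version B (the rewrite author's own statement) =====
-- stated objective: simpler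
-- what changed: Instead of scanning every row of the board (and every column of each adjacent row, with an inner is_valid_position scan over the rows), B enumerates the 9 candidate offsets around (row, col), skips the centre and bounds-checks each candidate directly.
import Mathlib
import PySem

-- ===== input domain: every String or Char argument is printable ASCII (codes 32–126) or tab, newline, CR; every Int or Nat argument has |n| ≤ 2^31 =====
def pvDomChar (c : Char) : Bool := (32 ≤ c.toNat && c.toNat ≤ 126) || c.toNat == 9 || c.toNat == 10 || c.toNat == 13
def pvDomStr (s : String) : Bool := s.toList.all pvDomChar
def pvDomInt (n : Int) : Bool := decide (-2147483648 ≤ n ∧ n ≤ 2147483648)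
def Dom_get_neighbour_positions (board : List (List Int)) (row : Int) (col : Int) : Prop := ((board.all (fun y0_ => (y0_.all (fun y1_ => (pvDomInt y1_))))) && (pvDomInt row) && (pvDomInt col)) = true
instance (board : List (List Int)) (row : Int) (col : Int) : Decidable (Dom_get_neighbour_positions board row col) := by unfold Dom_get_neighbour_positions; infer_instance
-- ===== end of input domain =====

-- B replaces A's scan over every row of the board (with an inner is_valid_position scan) by the 9 candidate offsets around (row, col), centre skipped, each bounds-checked: a simpler, direct enumeration.

-- ===== PORT A =====
-- 'for sub_list in board: if col in range: return True'; falling off the loop is Python's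
-- implicit 'return None', hence Option Bool (none = Python None)
def pvIvpLoop : List (List Int) → Int → Option Bool
  | [], _ => none
  | sub :: rest, col =>
      if 0 ≤ col ∧ col ≤ (sub.length : Int) - 1 then some true else pvIvpLoop rest col

def is_valid_position (board : List (List Int)) (row : Int) (col : Int) : Option Bool :=
  if 0 ≤ row ∧ row ≤ (board.length : Int) - 1 then pvIvpLoop board col
  else some false

-- board[i] with i drawn from range(len(board)) is always in range, so getD is exact here
def get_neighbour_positions (board : List (List Int)) (row : Int) (col : Int) : List (List Int) :=
  (List.range board.length).foldl (fun acc (i : Nat) =>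
    if (i : Int) = row - 1 ∨ (i : Int) = row ∨ (i : Int) = row + 1 then
      (List.range (board.getD i []).length).foldl (fun acc2 (j : Nat) =>
        if ((j : Int) = col - 1 ∨ (j : Int) = col ∨ (j : Int) = col + 1) ∧
           is_valid_position board (i : Int) (j : Int) = some true ∧
           ¬((i : Int) = row ∧ (j : Int) = col)
        then acc2 ++ [[(i : Int), (j : Int)]] else acc2) acc
    else acc) []

-- ===== PORT B =====
-- board[i] is only read under the guard 0 ≤ i < len(board), so getD i.toNat is exact there
def get_neighbour_positions_alt (board : List (List Int)) (row : Int) (col : Int) : List (List Int) :=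
  ([-1, 0, 1] : List Int).foldl (fun acc di =>
    if 0 ≤ row + di ∧ row + di < (board.length : Int) then
      ([-1, 0, 1] : List Int).foldl (fun acc2 dj =>
        if ¬(di = 0 ∧ dj = 0) ∧ 0 ≤ col + dj ∧
           col + dj < ((board.getD (row + di).toNat []).length : Int)
        then acc2 ++ [[row + di, col + dj]] else acc2) acc
    else acc) []

-- ===== PRECONDITION & SPEC =====
def Spec_get_neighbour_positions (board : List (List Int)) (row : Int) (col : Int) (out : List (List Int)) : Prop := out = get_neighbour_positions_alt board row col
instance (board : List (List Int)) (row : Int) (col : Int) (out : List (List Int)) : Decidable (Spec_get_neighbour_positions board row col out) := by unfold Spec_get_neighbour_positions; infer_instance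

-- ===== CLAIM (what is proved, stated in full; the proofs are below) =====
def Claim_equal_get_neighbour_positions : Prop := ∀ (board : List (List Int)) (row : Int) (col : Int), Dom_get_neighbour_positions board row col → Spec_get_neighbour_positions board row col (get_neighbour_positions board row col)

-- ===== LEMMAS AND PROOFS =====

-- common normal form: one candidate cell, one candidate row, guarded by bounds
def pvCell (board : List (List Int)) (row col x y : Int) : List (List Int) :=
  if 0 ≤ y ∧ y < ((board.getD x.toNat []).length : Int) then
    (if is_valid_position board x y = some true ∧ ¬(x = row ∧ y = col) then [[x, y]] else [])
  else []

def pvRowBody (board : List (List Int)) (row col x : Int) : List (List Int) :=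
  pvCell board row col x (col - 1) ++ (pvCell board row col x col ++ pvCell board row col x (col + 1))

def pvRow (board : List (List Int)) (row col x : Int) : List (List Int) :=
  if 0 ≤ x ∧ x < (board.length : Int) then pvRowBody board row col x else []

theorem pv_foldl_if_app {α β : Type} (l : List α) (p : α → Prop) [DecidablePred p]
    (g : α → List β) (acc : List β) :
    l.foldl (fun a x => if p x then a ++ g x else a) acc
      = acc ++ l.flatMap (fun x => if p x then g x else []) := by
  induction l generalizing acc with
  | nil => simp
  | cons h t ih => by_cases hp : p h <;> simp [hp, ih]

-- a scan of range n keeping only the indices c-1, c, c+1 is the in-range part of those three, in order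
theorem pv_key {α : Type} (n : Nat) (c : Int) (f : Int → List α) :
    (List.range n).flatMap
        (fun (i : Nat) => if ((i : Int) = c - 1 ∨ (i : Int) = c ∨ (i : Int) = c + 1) then f (i : Int) else [])
    = (if 0 ≤ c - 1 ∧ c - 1 < (n : Int) then f (c - 1) else [])
      ++ ((if 0 ≤ c ∧ c < (n : Int) then f c else [])
      ++ (if 0 ≤ c + 1 ∧ c + 1 < (n : Int) then f (c + 1) else [])) := by
  induction n with
  | zero =>
      simp only [List.range_zero, List.flatMap_nil]
      split_ifs <;> first | rfl | omega
  | succ m ih =>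
      rw [List.range_succ, List.flatMap_append, ih]
      simp only [List.flatMap_cons, List.flatMap_nil, List.append_nil]
      by_cases h1 : (m : Int) = c - 1
      · rw [if_neg (show ¬(0 ≤ c - 1 ∧ c - 1 < (m : Int)) by omega),
            if_neg (show ¬(0 ≤ c ∧ c < (m : Int)) by omega),
            if_neg (show ¬(0 ≤ c + 1 ∧ c + 1 < (m : Int)) by omega),
            if_pos (show (m : Int) = c - 1 ∨ (m : Int) = c ∨ (m : Int) = c + 1 from Or.inl h1),
            if_pos (show 0 ≤ c - 1 ∧ c - 1 < ((m + 1 : Nat) : Int) by omega),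
            if_neg (show ¬(0 ≤ c ∧ c < ((m + 1 : Nat) : Int)) by omega),
            if_neg (show ¬(0 ≤ c + 1 ∧ c + 1 < ((m + 1 : Nat) : Int)) by omega)]
        simp [h1]
      · by_cases h2 : (m : Int) = c
        · rw [if_congr (show (0 ≤ c - 1 ∧ c - 1 < ((m + 1 : Nat) : Int)) ↔ (0 ≤ c - 1 ∧ c - 1 < (m : Int)) by omega) rfl rfl,
              if_pos (show (m : Int) = c - 1 ∨ (m : Int) = c ∨ (m : Int) = c + 1 from Or.inr (Or.inl h2)),
              if_neg (show ¬(0 ≤ c ∧ c < (m : Int)) by omega),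
              if_neg (show ¬(0 ≤ c + 1 ∧ c + 1 < (m : Int)) by omega),
              if_pos (show 0 ≤ c ∧ c < ((m + 1 : Nat) : Int) by omega),
              if_neg (show ¬(0 ≤ c + 1 ∧ c + 1 < ((m + 1 : Nat) : Int)) by omega)]
          simp [h2]
        · by_cases h3 : (m : Int) = c + 1
          · rw [if_congr (show (0 ≤ c - 1 ∧ c - 1 < ((m + 1 : Nat) : Int)) ↔ (0 ≤ c - 1 ∧ c - 1 < (m : Int)) by omega) rfl rfl,
                if_congr (show (0 ≤ c ∧ c < ((m + 1 : Nat) : Int)) ↔ (0 ≤ c ∧ c < (m : Int)) by omega) rfl rfl,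
                if_neg (show ¬(0 ≤ c + 1 ∧ c + 1 < (m : Int)) by omega),
                if_pos (show (m : Int) = c - 1 ∨ (m : Int) = c ∨ (m : Int) = c + 1 from Or.inr (Or.inr h3)),
                if_pos (show 0 ≤ c + 1 ∧ c + 1 < ((m + 1 : Nat) : Int) by omega)]
            simp [h3]
          · rw [if_congr (show (0 ≤ c - 1 ∧ c - 1 < ((m + 1 : Nat) : Int)) ↔ (0 ≤ c - 1 ∧ c - 1 < (m : Int)) by omega) rfl rfl,
                if_congr (show (0 ≤ c ∧ c < ((m + 1 : Nat) : Int)) ↔ (0 ≤ c ∧ c < (m : Int)) by omega) rfl rfl,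
                if_congr (show (0 ≤ c + 1 ∧ c + 1 < ((m + 1 : Nat) : Int)) ↔ (0 ≤ c + 1 ∧ c + 1 < (m : Int)) by omega) rfl rfl,
                if_neg (show ¬((m : Int) = c - 1 ∨ (m : Int) = c ∨ (m : Int) = c + 1) from
                  fun h => h.elim h1 (fun h' => h'.elim h2 h3))]
            simp

theorem pv_ivploop_true (l : List (List Int)) (col : Int) (sub : List Int)
    (h : sub ∈ l) (h0 : 0 ≤ col) (h1 : col < (sub.length : Int)) :
    pvIvpLoop l col = some true := by
  induction l with
  | nil => cases h
  | cons a t ih =>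
      simp only [pvIvpLoop]
      split_ifs with hc
      · rfl
      · rcases List.mem_cons.mp h with rfl | hm
        · exact absurd ⟨h0, by omega⟩ hc
        · exact ih hm

theorem pv_ivp_true (board : List (List Int)) (i j : Int)
    (hi0 : 0 ≤ i) (hi1 : i < (board.length : Int))
    (hj0 : 0 ≤ j) (hj1 : j < ((board.getD i.toNat []).length : Int)) :
    is_valid_position board i j = some true := by
  unfold is_valid_position
  rw [if_pos ⟨hi0, by omega⟩]
  have hlt : i.toNat < board.length := by omega
  have hmem : board.getD i.toNat [] ∈ board := by
    rw [List.getD_eq_getElem _ _ hlt]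
    exact List.getElem_mem _
  exact pv_ivploop_true board j _ hmem hj0 hj1

theorem pv_A_nf (board : List (List Int)) (row col : Int) :
    get_neighbour_positions board row col
      = pvRow board row col (row - 1) ++ (pvRow board row col row ++ pvRow board row col (row + 1)) := by
  unfold get_neighbour_positions
  have hcong : ∀ (acc : List (List Int)) (i : Nat), i ∈ List.range board.length →
      (if (i : Int) = row - 1 ∨ (i : Int) = row ∨ (i : Int) = row + 1 then
        (List.range (board.getD i []).length).foldl (fun acc2 (j : Nat) =>
          if ((j : Int) = col - 1 ∨ (j : Int) = col ∨ (j : Int) = col + 1) ∧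
             is_valid_position board (i : Int) (j : Int) = some true ∧
             ¬((i : Int) = row ∧ (j : Int) = col)
          then acc2 ++ [[(i : Int), (j : Int)]] else acc2) acc
      else acc)
      = acc ++ (if (i : Int) = row - 1 ∨ (i : Int) = row ∨ (i : Int) = row + 1 then
                  pvRowBody board row col (i : Int) else []) := by
    intro acc i _
    by_cases hadj : (i : Int) = row - 1 ∨ (i : Int) = row ∨ (i : Int) = row + 1
    · rw [if_pos hadj, if_pos hadj]
      calc (List.range (board.getD i []).length).foldl (fun acc2 (j : Nat) =>
             if ((j : Int) = col - 1 ∨ (j : Int) = col ∨ (j : Int) = col + 1) ∧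
                is_valid_position board (i : Int) (j : Int) = some true ∧
                ¬((i : Int) = row ∧ (j : Int) = col)
             then acc2 ++ [[(i : Int), (j : Int)]] else acc2) acc
          = acc ++ (List.range (board.getD i []).length).flatMap (fun (j : Nat) =>
              if ((j : Int) = col - 1 ∨ (j : Int) = col ∨ (j : Int) = col + 1) ∧
                 is_valid_position board (i : Int) (j : Int) = some true ∧
                 ¬((i : Int) = row ∧ (j : Int) = col)
              then [[(i : Int), (j : Int)]] else []) := pv_foldl_if_app _ _ _ _
        _ = acc ++ pvRowBody board row col (i : Int) := by
            congr 1
            have hfun : (fun (j : Nat) =>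
                if ((j : Int) = col - 1 ∨ (j : Int) = col ∨ (j : Int) = col + 1) ∧
                   is_valid_position board (i : Int) (j : Int) = some true ∧
                   ¬((i : Int) = row ∧ (j : Int) = col)
                then [[(i : Int), (j : Int)]] else ([] : List (List Int)))
              = (fun (j : Nat) =>
                if ((j : Int) = col - 1 ∨ (j : Int) = col ∨ (j : Int) = col + 1) then
                  (if is_valid_position board (i : Int) (j : Int) = some true ∧
                      ¬((i : Int) = row ∧ (j : Int) = col) then [[(i : Int), (j : Int)]] else [])
                else []) := by
              funext j; split_ifs <;> tauto
            rw [hfun]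
            have hk := pv_key (board.getD i []).length col
              (fun y => if is_valid_position board (i : Int) y = some true ∧
                           ¬((i : Int) = row ∧ y = col) then [[(i : Int), y]] else [])
            exact hk.trans (by simp [pvRowBody, pvCell])
    · rw [if_neg hadj, if_neg hadj, List.append_nil]
  trans ((List.range board.length).foldl (fun acc (i : Nat) =>
      acc ++ (if (i : Int) = row - 1 ∨ (i : Int) = row ∨ (i : Int) = row + 1 then
        pvRowBody board row col (i : Int) else [])) [])
  · apply PySem.List.foldl_congr_mem
    exact hcong
  · rw [PySem.List.foldl_append_eq_flatMap, List.nil_append]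
    simp only [pvRow]
    exact pv_key board.length row (pvRowBody board row col)

theorem pv_cell_eq (board : List (List Int)) (row col di dj : Int)
    (hb : 0 ≤ row + di ∧ row + di < (board.length : Int)) :
    (if ¬(di = 0 ∧ dj = 0) ∧ 0 ≤ col + dj ∧
        col + dj < ((board.getD (row + di).toNat []).length : Int)
     then [[row + di, col + dj]] else ([] : List (List Int)))
    = pvCell board row col (row + di) (col + dj) := by
  unfold pvCell
  by_cases hy : 0 ≤ col + dj ∧ col + dj < ((board.getD (row + di).toNat []).length : Int)
  · rw [if_pos hy]
    have hv : is_valid_position board (row + di) (col + dj) = some true :=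
      pv_ivp_true board _ _ hb.1 hb.2 hy.1 hy.2
    by_cases hc : di = 0 ∧ dj = 0
    · obtain ⟨e1, e2⟩ := hc
      subst e1; subst e2
      simp
    · rw [if_pos ⟨hc, hy⟩, if_pos ⟨hv, fun h => hc ⟨by omega, by omega⟩⟩]
  · rw [if_neg (fun h => hy h.2), if_neg hy]

theorem pv_B_nf (board : List (List Int)) (row col : Int) :
    get_neighbour_positions_alt board row col
      = pvRow board row col (row - 1) ++ (pvRow board row col row ++ pvRow board row col (row + 1)) := by
  unfold get_neighbour_positions_alt
  have hcong : ∀ (acc : List (List Int)) (di : Int), di ∈ ([-1, 0, 1] : List Int) →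
      (if 0 ≤ row + di ∧ row + di < (board.length : Int) then
        ([-1, 0, 1] : List Int).foldl (fun acc2 dj =>
          if ¬(di = 0 ∧ dj = 0) ∧ 0 ≤ col + dj ∧
             col + dj < ((board.getD (row + di).toNat []).length : Int)
          then acc2 ++ [[row + di, col + dj]] else acc2) acc
      else acc)
      = acc ++ (if 0 ≤ row + di ∧ row + di < (board.length : Int) then
                  pvRowBody board row col (row + di) else []) := by
    intro acc di _
    by_cases hg : 0 ≤ row + di ∧ row + di < (board.length : Int)
    · rw [if_pos hg, if_pos hg]
      calc ([-1, 0, 1] : List Int).foldl (fun acc2 dj =>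
             if ¬(di = 0 ∧ dj = 0) ∧ 0 ≤ col + dj ∧
                col + dj < ((board.getD (row + di).toNat []).length : Int)
             then acc2 ++ [[row + di, col + dj]] else acc2) acc
          = acc ++ ([-1, 0, 1] : List Int).flatMap (fun dj =>
              if ¬(di = 0 ∧ dj = 0) ∧ 0 ≤ col + dj ∧
                 col + dj < ((board.getD (row + di).toNat []).length : Int)
              then [[row + di, col + dj]] else []) := pv_foldl_if_app _ _ _ _
        _ = acc ++ pvRowBody board row col (row + di) := by
            congr 1
            rw [List.flatMap_cons, List.flatMap_cons, List.flatMap_cons, List.flatMap_nil,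
                List.append_nil]
            rw [pv_cell_eq board row col di (-1) hg, pv_cell_eq board row col di 0 hg,
                pv_cell_eq board row col di 1 hg]
            rw [show col + (-1 : Int) = col - 1 from by ring, show col + (0 : Int) = col from by ring]
            rfl
    · rw [if_neg hg, if_neg hg, List.append_nil]
  trans (([-1, 0, 1] : List Int).foldl (fun acc (di : Int) =>
      acc ++ (if 0 ≤ row + di ∧ row + di < (board.length : Int) then
        pvRowBody board row col (row + di) else [])) [])
  · apply PySem.List.foldl_congr_mem
    exact hcong
  · rw [PySem.List.foldl_append_eq_flatMap, List.nil_append,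
        List.flatMap_cons, List.flatMap_cons, List.flatMap_cons, List.flatMap_nil, List.append_nil]
    rw [show row + (-1 : Int) = row - 1 from by ring, show row + (0 : Int) = row from by ring]
    rfl

-- ===== VERDICT (by name: the statement is the Claim_ definition above) =====
theorem get_neighbour_positions_spec : Claim_equal_get_neighbour_positions := by
  intro board row col _
  unfold Spec_get_neighbour_positions
  rw [pv_A_nf, pv_B_nf]
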